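-- pv_equiv track=rewrite | github.com/tradenewsrepos/re-model | er_server.py | get_subj_and_obj_pairs
-- ===== SOURCE A (Python) =====
-- subj_ners = [
--     "ORGANIZATION",
--     "PERSON",
--     "GROUP",
--     "FAMILY",
--     "GPE",
--     "COUNTRY",
--     "CITY",
--     "REGION",
--     "DATE",
--     "PROFESSION",
--     "PRODUCT",
--     "WEBSITE",
--     "FAC",
--     "CARDINAL",
--     "ORDINAL",
--     "QUANTITY",
--     "PERCENT",
--     "MONEY",
--     "PRICE",
--     "EVENT",
--     "CURRENCY",
--     "LAW",
--     "LOCATION",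
--     "INVESTMENT_PROJECT",
--     "TRADE_AGREEMENT",
--     "ECONOMIC_SECTOR",
-- ]
--
-- all_ners = [
--     "ORGANIZATION",
--     "PERSON",
--     "GROUP",
--     "FAMILY",
--     "GPE",
--     "COUNTRY",
--     "CITY",
--     "REGION",
--     "DATE",
--     "PROFESSION",
--     "PRODUCT",
--     "WEBSITE",
--     "FAC",
--     "CARDINAL",
--     "ORDINAL",
--     "QUANTITY",
--     "PERCENT",
--     "MONEY",
--     "PRICE",
--     "EVENT",
--     "CURRENCY",
--     "LAW",
--     "LOCATION",
--     "INVESTMENT_PROJECT",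
--     "TRADE_AGREEMENT",
--     "ECONOMIC_SECTOR",
-- ]
--
-- def get_subj_and_obj_pairs(tags, commutative=True):
--     first_loop = [i for i, tag in enumerate(tags) if tag in subj_ners]
--     seen = set()
--     for subj_start in first_loop:
--         idx = 1
--         while subj_start + idx < len(tags) and tags[subj_start + idx].startswith("I-"):
--             idx += 1
--         subj_end = subj_start + idx - 1
--         second_loop = [
--             i for i, tag in enumerate(tags) if tag in all_ners and i != subj_start
--         ]
--         for obj_start in second_loop:
--             idx = 1
--             while obj_start + idx < len(tags) and tags[obj_start + idx].startswith(
--                 "I-"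
--             ):
--                 idx += 1
--             obj_end = obj_start + idx - 1
--             if commutative:
--                 entities = tuple(sorted([subj_start, obj_start]))
--                 if entities in seen:
--                     continue
--                 else:
--                     seen.add(entities)
--
--             yield (subj_start, subj_end, tags[subj_start]), (
--                 obj_start,
--                 obj_end,
--                 tags[obj_start],
--             )
-- ===== SOURCE B (Python) =====
-- # B: precompute each position's I- run end in ONE backward pass and the entity
-- # index list ONCE; dedup-by-seen-set is replaced by the order filter (a<b / b!=a).
-- all_ners = [
--     "ORGANIZATION", "PERSON", "GROUP", "FAMILY", "GPE", "COUNTRY", "CITY",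
--     "REGION", "DATE", "PROFESSION", "PRODUCT", "WEBSITE", "FAC", "CARDINAL",
--     "ORDINAL", "QUANTITY", "PERCENT", "MONEY", "PRICE", "EVENT", "CURRENCY",
--     "LAW", "LOCATION", "INVESTMENT_PROJECT", "TRADE_AGREEMENT", "ECONOMIC_SECTOR",
-- ]
--
-- def get_subj_and_obj_pairs(tags, commutative=True):
--     n = len(tags)
--     ends = [0] * n
--     for i in range(n - 1, -1, -1):
--         ends[i] = ends[i + 1] if (i + 1 < n and tags[i + 1].startswith("I-")) else i
--     ner_set = set(all_ners)
--     ents = [i for i, t in enumerate(tags) if t in ner_set]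
--     for a in ents:
--         for b in ents:
--             if (a < b) if commutative else (b != a):
--                 yield (a, ends[a], tags[a]), (b, ends[b], tags[b])
-- ===== Notes on version B (the rewrite author's own statement) =====
-- stated objective: alternative
-- what changed: B precomputes every position's I- span end in one backward pass and builds the entity index list once, and replaces A's per-subject entity rescan and seen-set deduplication with a single doubly-nested loop over that list filtered by b>a (commutative) or b!=a.
import Mathlib
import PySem

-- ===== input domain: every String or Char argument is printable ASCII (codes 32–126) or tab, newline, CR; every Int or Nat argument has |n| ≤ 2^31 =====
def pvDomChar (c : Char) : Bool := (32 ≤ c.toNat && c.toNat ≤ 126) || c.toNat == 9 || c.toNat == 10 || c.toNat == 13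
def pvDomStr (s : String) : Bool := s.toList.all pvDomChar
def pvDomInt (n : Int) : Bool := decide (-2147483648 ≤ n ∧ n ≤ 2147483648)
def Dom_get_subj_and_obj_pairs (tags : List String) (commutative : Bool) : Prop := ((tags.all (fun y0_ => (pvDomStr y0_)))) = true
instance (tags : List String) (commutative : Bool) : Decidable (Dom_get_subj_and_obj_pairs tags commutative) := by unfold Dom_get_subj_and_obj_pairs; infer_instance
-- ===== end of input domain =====

-- B precomputes each position's I- run end in one backward pass and builds the entity
-- index list once, replacing A's per-subject rescans and seen-set dedup by an order filter.
-- Both Pythons are generators; equivalence is about the yielded sequence (as a list).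

-- ===== PORT A =====
def pvSubjNers : List String := ["ORGANIZATION", "PERSON", "GROUP", "FAMILY", "GPE", "COUNTRY", "CITY", "REGION", "DATE", "PROFESSION", "PRODUCT", "WEBSITE", "FAC", "CARDINAL", "ORDINAL", "QUANTITY", "PERCENT", "MONEY", "PRICE", "EVENT", "CURRENCY", "LAW", "LOCATION", "INVESTMENT_PROJECT", "TRADE_AGREEMENT", "ECONOMIC_SECTOR"]
def pvAllNers : List String := ["ORGANIZATION", "PERSON", "GROUP", "FAMILY", "GPE", "COUNTRY", "CITY", "REGION", "DATE", "PROFESSION", "PRODUCT", "WEBSITE", "FAC", "CARDINAL", "ORDINAL", "QUANTITY", "PERCENT", "MONEY", "PRICE", "EVENT", "CURRENCY", "LAW", "LOCATION", "INVESTMENT_PROJECT", "TRADE_AGREEMENT", "ECONOMIC_SECTOR"]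

-- A's while loop: idx = 1; while start+idx < len(tags) and tags[start+idx].startswith("I-"): idx += 1
def pvSpanIdxA (tags : List String) (s : Int) (idx : Nat) : Nat :=
  if s + idx < (tags.length : Int) ∧ PySem.Str.startswith (PySem.List.pyGetD tags (s + idx) "") "I-" then
    pvSpanIdxA tags s (idx + 1)
  else idx
termination_by (((tags.length : Int) - (s + idx)).toNat)
decreasing_by omega

-- the inner (obj) loop body of A
def pvStepA (tags : List String) (commutative : Bool) (subj_start subj_end : Int)
    (st : PySem.Set (Int × Int) × List ((Int × Int × String) × (Int × Int × String))) (obj_start : Int) :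
    PySem.Set (Int × Int) × List ((Int × Int × String) × (Int × Int × String)) :=
  let obj_end : Int := obj_start + pvSpanIdxA tags obj_start 1 - 1
  let pair := ((subj_start, subj_end, PySem.List.pyGetD tags subj_start ""),
               (obj_start, obj_end, PySem.List.pyGetD tags obj_start ""))
  if commutative then
    -- tuple(sorted([subj_start, obj_start])) of two ints
    let entities : Int × Int := (min subj_start obj_start, max subj_start obj_start)
    if PySem.Set.contains st.1 entities then st
    else (PySem.Set.add st.1 entities, st.2 ++ [pair])
  else (st.1, st.2 ++ [pair])

-- the outer (subj) loop body of A: recompute second_loop, the span, then fold the inner loop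
def pvOuterA (tags : List String) (commutative : Bool)
    (st : PySem.Set (Int × Int) × List ((Int × Int × String) × (Int × Int × String))) (subj_start : Int) :
    PySem.Set (Int × Int) × List ((Int × Int × String) × (Int × Int × String)) :=
  let subj_end : Int := subj_start + pvSpanIdxA tags subj_start 1 - 1
  let second_loop := ((PySem.List.enumerate tags).filter
      (fun p => pvAllNers.contains p.2 && p.1 != subj_start)).map (·.1)
  second_loop.foldl (pvStepA tags commutative subj_start subj_end) st

def get_subj_and_obj_pairs (tags : List String) (commutative : Bool) :
    List ((Int × Int × String) × (Int × Int × String)) :=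
  let first_loop := ((PySem.List.enumerate tags).filter (fun p => pvSubjNers.contains p.2)).map (·.1)
  (first_loop.foldl (pvOuterA tags commutative) ((PySem.Set.empty : PySem.Set (Int × Int)), [])).2

-- ===== PORT B =====
-- B's backward array fill: ends[i] = ends[i+1] if (i+1 < n and tags[i+1].startswith("I-")) else i
def pvEndB (tags : List String) (i : Int) : Int :=
  if i + 1 < (tags.length : Int) ∧ PySem.Str.startswith (PySem.List.pyGetD tags (i + 1) "") "I-" then
    pvEndB tags (i + 1)
  else i
termination_by (((tags.length : Int) - i).toNat)
decreasing_by omega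

def pvMkB (tags : List String) (a b : Int) : (Int × Int × String) × (Int × Int × String) :=
  ((a, pvEndB tags a, PySem.List.pyGetD tags a ""), (b, pvEndB tags b, PySem.List.pyGetD tags b ""))

def get_subj_and_obj_pairs_alt (tags : List String) (commutative : Bool) :
    List ((Int × Int × String) × (Int × Int × String)) :=
  let nerSet : PySem.Set String := PySem.Set.ofList pvAllNers
  let ents := ((PySem.List.enumerate tags).filter (fun p => PySem.Set.contains nerSet p.2)).map (·.1)
  ents.flatMap (fun a =>
    (ents.filter (fun b => if commutative then decide (a < b) else b != a)).map (pvMkB tags a))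

-- ===== PRECONDITION & SPEC =====
def Spec_get_subj_and_obj_pairs (tags : List String) (commutative : Bool) (out : List ((Int × Int × String) × (Int × Int × String))) : Prop := out = get_subj_and_obj_pairs_alt tags commutative
instance (tags : List String) (commutative : Bool) (out : List ((Int × Int × String) × (Int × Int × String))) : Decidable (Spec_get_subj_and_obj_pairs tags commutative out) := by unfold Spec_get_subj_and_obj_pairs; infer_instance

-- ===== CLAIM (what is proved, stated in full; the proofs are below) =====
def Claim_equal_get_subj_and_obj_pairs : Prop := ∀ (tags : List String) (commutative : Bool), Dom_get_subj_and_obj_pairs tags commutative → Spec_get_subj_and_obj_pairs tags commutative (get_subj_and_obj_pairs tags commutative)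

-- ===== LEMMAS AND PROOFS =====

-- span while-loop shift: advancing idx is the same as advancing the start
theorem pv_span_shift (tags : List String) (s : Int) (idx : Nat) :
    pvSpanIdxA tags s (idx + 1) = pvSpanIdxA tags (s + 1) idx + 1 := by
  conv_lhs => rw [pvSpanIdxA]
  conv_rhs => rw [pvSpanIdxA]
  have harg : s + ((idx + 1 : Nat) : Int) = (s + 1) + (idx : Int) := by push_cast; ring
  rw [harg]
  split_ifs with h
  · exact pv_span_shift tags s (idx + 1)
  · rfl
termination_by (((tags.length : Int) - (s + idx)).toNat)
decreasing_by omega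

-- A's while-loop span end equals B's backward-pass end
theorem pv_span_eq_end (tags : List String) (s : Int) :
    s + (pvSpanIdxA tags s 1 : Nat) - 1 = pvEndB tags s := by
  rw [pvSpanIdxA, pvEndB]
  have harg : s + ((1 : Nat) : Int) = s + 1 := by norm_num
  rw [harg]
  split_ifs with h
  · have hsh : pvSpanIdxA tags s (1 + 1) = pvSpanIdxA tags (s + 1) 1 + 1 := pv_span_shift tags s 1
    rw [hsh]
    have := pv_span_eq_end tags (s + 1)
    push_cast
    push_cast at this
    omega
  · norm_num
termination_by (((tags.length : Int) - s).toNat)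
decreasing_by omega

-- the entity index list both programs are based on
def pvEnts (tags : List String) : List Int :=
  ((PySem.List.enumerate tags).filter (fun p => pvAllNers.contains p.2)).map (·.1)

theorem pvEnts_pairwise (tags : List String) : (pvEnts tags).Pairwise (· < ·) := by
  unfold pvEnts
  rw [List.pairwise_map]
  exact List.Pairwise.sublist List.filter_sublist (PySem.List.pairwise_lt_enumerate ..)

theorem pvEnts_nodup (tags : List String) : (pvEnts tags).Nodup :=
  (pvEnts_pairwise tags).imp (fun h => ne_of_lt h)

-- filtering on the index after projecting commutes with filtering before
theorem pv_filter_map_fst (l : List (Int × String)) (c : String → Bool) (d : Int → Bool) :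
    ((l.filter (fun p => c p.2 && d p.1)).map (·.1))
      = ((l.filter (fun p => c p.2)).map (·.1)).filter d := by
  induction l with
  | nil => rfl
  | cons p t ih =>
      by_cases hc : c p.2 <;> by_cases hd : d p.1 <;>
        simp [hc, hd, ih]

-- the second_loop of A is the entity list minus the subject
theorem pv_second_loop (tags : List String) (a : Int) :
    ((PySem.List.enumerate tags).filter (fun p => pvAllNers.contains p.2 && p.1 != a)).map (·.1)
      = (pvEnts tags).filter (fun b => b != a) := by
  exact pv_filter_map_fst (PySem.List.enumerate tags) (fun t => pvAllNers.contains t) (fun i => i != a)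

-- B's entity list is the same list
theorem pv_ents_alt (tags : List String) :
    ((PySem.List.enumerate tags).filter (fun p => PySem.Set.contains (PySem.Set.ofList pvAllNers) p.2)).map (·.1)
      = pvEnts tags := by
  unfold pvEnts
  congr 1

-- INNER LOOP, commutative: with a seen-set containing exactly the pairs whose min was an
-- earlier subject, the inner fold emits exactly the objects greater than the subject
theorem pv_inner_comm (tags : List String) (a se : Int)
    (objs : List Int) (S : PySem.Set (Int × Int))
    (out : List ((Int × Int × String) × (Int × Int × String)))
    (hnd : objs.Nodup)
    (hne : ∀ b ∈ objs, b ≠ a)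
    (hlt : ∀ b ∈ objs, b < a → (b, a) ∈ S)
    (hgt : ∀ b ∈ objs, a < b → (a, b) ∉ S) :
    (objs.foldl (pvStepA tags true a se) (S, out)).2
       = out ++ (objs.filter (fun b => decide (a < b))).map
            (fun b => ((a, se, PySem.List.pyGetD tags a ""), (b, pvEndB tags b, PySem.List.pyGetD tags b "")))
    ∧ ∀ p : Int × Int, p ∈ (objs.foldl (pvStepA tags true a se) (S, out)).1
        ↔ p ∈ S ∨ ∃ b ∈ objs, a < b ∧ p = (a, b) := by
  induction objs generalizing S out with
  | nil => simp
  | cons b t ih =>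
      have hba : b ≠ a := hne b (List.mem_cons_self ..)
      rcases lt_or_gt_of_ne hba with hb | hb
      · -- b < a: sorted pair is (b, a), already seen; skipped
        have hmem : (b, a) ∈ S := hlt b (List.mem_cons_self ..) hb
        have hstep : pvStepA tags true a se (S, out) b = (S, out) := by
          simp only [pvStepA]
          rw [if_pos trivial, if_pos ((PySem.Set.contains_iff _ _).mpr (by
            have : min a b = b := by omega
            have h2 : max a b = a := by omega
            simp [this, h2, hmem]))]
        rw [List.foldl_cons, hstep]
        obtain ⟨h1, h2⟩ := ih S out hnd.of_cons (fun x hx => hne x (List.mem_cons_of_mem _ hx))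
          (fun x hx => hlt x (List.mem_cons_of_mem _ hx))
          (fun x hx => hgt x (List.mem_cons_of_mem _ hx))
        refine ⟨?_, ?_⟩
        · rw [h1]
          have : decide (a < b) = false := by simp; omega
          simp [this]
        · intro p
          rw [h2 p]
          constructor
          · rintro (h | ⟨x, hx, hax, rfl⟩)
            · exact Or.inl h
            · exact Or.inr ⟨x, List.mem_cons_of_mem _ hx, hax, rfl⟩
          · rintro (h | ⟨x, hx, hax, rfl⟩)
            · exact Or.inl h
            · rcases List.mem_cons.mp hx with rfl | hx
              · omega
              · exact Or.inr ⟨x, hx, hax, rfl⟩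
      · -- a < b: sorted pair is (a, b), fresh; emitted and added to seen
        have hnmem : (a, b) ∉ S := hgt b (List.mem_cons_self ..) hb
        have hstep : pvStepA tags true a se (S, out) b
            = (PySem.Set.add S (a, b),
               out ++ [((a, se, PySem.List.pyGetD tags a ""),
                        (b, b + (pvSpanIdxA tags b 1 : Nat) - 1, PySem.List.pyGetD tags b ""))]) := by
          simp only [pvStepA]
          rw [if_pos trivial]
          have hmin : min a b = a := by omega
          have hmax : max a b = b := by omega
          rw [hmin, hmax, if_neg (by simp [hnmem])]
        rw [List.foldl_cons, hstep]
        have hlt' : ∀ x ∈ t, x < a → (x, a) ∈ PySem.Set.add S (a, b) := fun x hx h =>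
          (PySem.Set.mem_add _ _ _).mpr (Or.inl (hlt x (List.mem_cons_of_mem _ hx) h))
        have hgt' : ∀ x ∈ t, a < x → (a, x) ∉ PySem.Set.add S (a, b) := by
          intro x hx h hc
          rcases (PySem.Set.mem_add _ _ _).mp hc with hc | hc
          · exact hgt x (List.mem_cons_of_mem _ hx) h hc
          · have : x = b := by injection hc
            exact (List.nodup_cons.mp hnd).1 (this ▸ hx)
        obtain ⟨h1, h2⟩ := ih (PySem.Set.add S (a, b)) _ hnd.of_cons
          (fun x hx => hne x (List.mem_cons_of_mem _ hx)) hlt' hgt'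
        refine ⟨?_, ?_⟩
        · rw [h1]
          have : decide (a < b) = true := by simp; omega
          rw [pv_span_eq_end tags b]
          simp [this]
        · intro p
          rw [h2 p]
          constructor
          · rintro (h | ⟨x, hx, hax, rfl⟩)
            · rcases (PySem.Set.mem_add _ _ _).mp h with h | h
              · exact Or.inl h
              · exact Or.inr ⟨b, List.mem_cons_self .., hb, h⟩
            · exact Or.inr ⟨x, List.mem_cons_of_mem _ hx, hax, rfl⟩
          · rintro (h | ⟨x, hx, hax, rfl⟩)
            · exact Or.inl ((PySem.Set.mem_add _ _ _).mpr (Or.inl h))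
            · rcases List.mem_cons.mp hx with rfl | hx
              · exact Or.inl ((PySem.Set.mem_add _ _ _).mpr (Or.inr rfl))
              · exact Or.inr ⟨x, hx, hax, rfl⟩

-- combining the two filters: among the entities ≠ a, those > a are just those > a
theorem pv_filter_gt (E : List Int) (a : Int) :
    (E.filter (fun b => b != a)).filter (fun b => decide (a < b))
      = E.filter (fun b => decide (a < b)) := by
  induction E with
  | nil => rfl
  | cons x t ih =>
      by_cases h : a < x
      · have hx : (x != a) = true := by simp; omega
        simp [hx, h, ih]
      · by_cases hxa : x = a <;> simp [hxa, h, ih]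

-- OUTER LOOP, commutative
theorem pv_outer_comm (tags : List String) :
    ∀ (rest P : List Int), pvEnts tags = P ++ rest →
    ∀ (S : PySem.Set (Int × Int)) (out : List ((Int × Int × String) × (Int × Int × String))),
    (∀ p : Int × Int, p ∈ S ↔ ∃ x ∈ P, ∃ y ∈ pvEnts tags, x < y ∧ p = (x, y)) →
    (rest.foldl (pvOuterA tags true) (S, out)).2
      = out ++ rest.flatMap (fun a => ((pvEnts tags).filter (fun b => decide (a < b))).map (pvMkB tags a)) := by
  intro rest
  induction rest with
  | nil => intro P _ S out _; simp
  | cons a t ih =>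
      intro P hEP S out hS
      have hE := pvEnts_pairwise tags
      rw [hEP] at hE
      rw [List.pairwise_append] at hE
      obtain ⟨hP, hat, hcross⟩ := hE
      have hPa : ∀ x ∈ P, x < a := fun x hx => hcross x hx a (List.mem_cons_self ..)
      have hat' : ∀ r ∈ t, a < r := (List.pairwise_cons.mp hat).1
      -- one outer step
      rw [List.foldl_cons]
      have houter : pvOuterA tags true (S, out) a
          = ((pvEnts tags).filter (fun b => b != a)).foldl
              (pvStepA tags true a (a + (pvSpanIdxA tags a 1 : Nat) - 1)) (S, out) := by
        simp only [pvOuterA, pv_second_loop]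
      set objs := (pvEnts tags).filter (fun b => b != a) with hobjs
      have hmem_objs : ∀ b, b ∈ objs → b ∈ pvEnts tags ∧ b ≠ a := by
        intro b hb
        have := List.mem_filter.mp hb
        exact ⟨this.1, by simpa using this.2⟩
      have hnd : objs.Nodup := (pvEnts_nodup tags).filter _
      have hne : ∀ b ∈ objs, b ≠ a := fun b hb => (hmem_objs b hb).2
      have hlt : ∀ b ∈ objs, b < a → (b, a) ∈ S := by
        intro b hb hba
        obtain ⟨hbE, _⟩ := hmem_objs b hb
        have hbP : b ∈ P := by
          rw [hEP] at hbE
          rcases List.mem_append.mp hbE with h | h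
          · exact h
          · rcases List.mem_cons.mp h with rfl | h
            · omega
            · exact absurd (hat' b h) (by omega)
        exact (hS (b, a)).mpr ⟨b, hbP, a, by rw [hEP]; exact List.mem_append_right _ (List.mem_cons_self ..), hba, rfl⟩
      have hgt : ∀ b ∈ objs, a < b → (a, b) ∉ S := by
        intro b hb hab hc
        obtain ⟨x, hxP, y, _, _, heq⟩ := (hS (a, b)).mp hc
        have : x = a := by injection heq with h1 _; exact h1.symm
        exact absurd (hPa x hxP) (by omega)
      obtain ⟨h1, h2⟩ := pv_inner_comm tags a (a + (pvSpanIdxA tags a 1 : Nat) - 1) objs S out hnd hne hlt hgt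
      rw [houter]
      -- recurse on the tail with P ++ [a]
      have hinv : ∀ p : Int × Int, p ∈ (objs.foldl (pvStepA tags true a (a + (pvSpanIdxA tags a 1 : Nat) - 1)) (S, out)).1
          ↔ ∃ x ∈ P ++ [a], ∃ y ∈ pvEnts tags, x < y ∧ p = (x, y) := by
        intro p
        rw [h2 p]
        constructor
        · rintro (h | ⟨b, hb, hab, rfl⟩)
          · obtain ⟨x, hx, y, hy, hxy, rfl⟩ := (hS p).mp h
            exact ⟨x, List.mem_append_left _ hx, y, hy, hxy, rfl⟩
          · exact ⟨a, List.mem_append_right _ (List.mem_cons_self ..), b, (hmem_objs b hb).1, hab, rfl⟩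
        · rintro ⟨x, hx, y, hy, hxy, rfl⟩
          rcases List.mem_append.mp hx with hx | hx
          · exact Or.inl ((hS (x, y)).mpr ⟨x, hx, y, hy, hxy, rfl⟩)
          · rcases List.mem_cons.mp hx with rfl | hx
            · refine Or.inr ⟨y, List.mem_filter.mpr ⟨hy, by simp; omega⟩, hxy, rfl⟩
            · simp at hx
      have := ih (P ++ [a]) (by rw [hEP]; simp)
        ((objs.foldl (pvStepA tags true a (a + (pvSpanIdxA tags a 1 : Nat) - 1)) (S, out)).1)
        ((objs.foldl (pvStepA tags true a (a + (pvSpanIdxA tags a 1 : Nat) - 1)) (S, out)).2)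
        hinv
      rw [Prod.mk.eta] at this
      rw [this, h1]
      rw [List.flatMap_cons, pv_span_eq_end tags a]
      rw [hobjs, pv_filter_gt]
      simp [pvMkB, List.append_assoc]

-- INNER LOOP, non-commutative: everything is emitted, the seen-set is untouched
theorem pv_inner_noncomm (tags : List String) (a se : Int)
    (objs : List Int) (S : PySem.Set (Int × Int))
    (out : List ((Int × Int × String) × (Int × Int × String))) :
    objs.foldl (pvStepA tags false a se) (S, out)
       = (S, out ++ objs.map
            (fun b => ((a, se, PySem.List.pyGetD tags a ""), (b, pvEndB tags b, PySem.List.pyGetD tags b "")))) := by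
  induction objs generalizing out with
  | nil => simp
  | cons b t ih =>
      rw [List.foldl_cons]
      have hstep : pvStepA tags false a se (S, out) b
          = (S, out ++ [((a, se, PySem.List.pyGetD tags a ""),
                         (b, pvEndB tags b, PySem.List.pyGetD tags b ""))]) := by
        simp only [pvStepA]
        rw [if_neg (by simp), pv_span_eq_end tags b]
      rw [hstep, ih]
      simp

-- OUTER LOOP, non-commutative
theorem pv_outer_noncomm (tags : List String) :
    ∀ (rest : List Int) (S : PySem.Set (Int × Int)) (out : List ((Int × Int × String) × (Int × Int × String))),
    (rest.foldl (pvOuterA tags false) (S, out)).2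
      = out ++ rest.flatMap (fun a => ((pvEnts tags).filter (fun b => b != a)).map (pvMkB tags a)) := by
  intro rest
  induction rest with
  | nil => intro S out; simp
  | cons a t ih =>
      intro S out
      rw [List.foldl_cons]
      have houter : pvOuterA tags false (S, out) a
          = ((pvEnts tags).filter (fun b => b != a)).foldl
              (pvStepA tags false a (a + (pvSpanIdxA tags a 1 : Nat) - 1)) (S, out) := by
        simp only [pvOuterA, pv_second_loop]
      rw [houter, pv_inner_noncomm, ih]
      rw [List.flatMap_cons, pv_span_eq_end tags a]
      simp [pvMkB, List.append_assoc]

-- ===== VERDICT (by name: the statement is the Claim_ definition above) =====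
theorem get_subj_and_obj_pairs_spec : Claim_equal_get_subj_and_obj_pairs := by
  intro tags commutative _
  unfold Spec_get_subj_and_obj_pairs
  show get_subj_and_obj_pairs tags commutative = _
  unfold get_subj_and_obj_pairs get_subj_and_obj_pairs_alt
  simp only [pv_ents_alt]
  have hfirst : ((PySem.List.enumerate tags).filter (fun p => pvSubjNers.contains p.2)).map (·.1) = pvEnts tags := by
    unfold pvEnts
    rfl
  rw [hfirst]
  cases commutative with
  | false =>
      rw [pv_outer_noncomm tags (pvEnts tags) PySem.Set.empty []]
      simp
  | true =>
      rw [pv_outer_comm tags (pvEnts tags) [] rfl PySem.Set.empty []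
        (by intro p; constructor
            · intro h; simp [PySem.Set.empty] at h
            · rintro ⟨x, hx, _⟩; simp at hx)]
      simp
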